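-- pv_equiv track=rewrite | github.com/andreranza/my-python-workout | exercise-9.py | even_odd_sums
-- ===== SOURCE A (Python) =====
-- def even_odd_sums(a_sequence):
--     """Return a two-element list, containing the sum of the even-indexed numbers
--        and the sum of the odd-indexed numbers"""
--     even_indexed = 0
--     odd_indexed = 0
--     for i, num, in enumerate(a_sequence, start=1):
--         if i % 2 == 0:
--             even_indexed = even_indexed + num
--         else:
--             odd_indexed = odd_indexed + num
--     return [even_indexed, odd_indexed]
-- ===== SOURCE B (Python) =====
-- def even_odd_sums(a_sequence):
--     """Return a two-element list, containing the sum of the even-indexed numbers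
--        and the sum of the odd-indexed numbers"""
--     even_indexed = 0
--     odd_indexed = 0
--     it = iter(a_sequence)
--     for x in it:
--         odd_indexed += x
--         even_indexed += next(it, 0)
--     return [even_indexed, odd_indexed]
-- ===== Notes on version B (the rewrite author's own statement) =====
-- stated objective: alternative
-- what changed: B consumes the sequence two elements at a time from an iterator, eliminating enumerate and the per-element parity branch; A tests i % 2 on every enumerated element.
import Mathlib
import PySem

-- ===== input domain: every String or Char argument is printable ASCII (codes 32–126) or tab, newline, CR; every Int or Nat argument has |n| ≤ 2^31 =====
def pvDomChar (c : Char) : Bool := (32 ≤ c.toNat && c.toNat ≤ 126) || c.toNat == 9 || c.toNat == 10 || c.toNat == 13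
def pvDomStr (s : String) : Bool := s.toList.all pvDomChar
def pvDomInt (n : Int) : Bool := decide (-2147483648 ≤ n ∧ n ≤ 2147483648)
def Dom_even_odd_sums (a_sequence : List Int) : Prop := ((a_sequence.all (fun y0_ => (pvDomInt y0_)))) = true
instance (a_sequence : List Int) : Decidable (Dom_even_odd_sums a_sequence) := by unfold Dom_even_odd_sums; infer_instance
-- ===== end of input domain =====

-- B sums the sequence two elements at a time from an iterator, removing A's enumerate and per-element parity branch (alternative decomposition, same cost).


-- ===== PORT A =====
-- for i, num in enumerate(a_sequence, start=1): if i % 2 == 0 then even += num else odd += num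
def even_odd_sums (a_sequence : List Int) : List Int :=
  let st := (PySem.List.enumerate a_sequence 1).foldl
    (fun (acc : Int × Int) p =>
      if p.1 % 2 == 0 then (acc.1 + p.2, acc.2) else (acc.1, acc.2 + p.2))
    (0, 0)
  [st.1, st.2]

-- ===== PORT B =====
-- the for-x-in-it loop taking two elements per step: odd += x; even += next(it, 0)
def pvPairLoop (odd even : Int) : List Int → Int × Int
  | [] => (odd, even)
  | [x] => (odd + x, even + 0)
  | x :: y :: rest => pvPairLoop (odd + x) (even + y) rest

def even_odd_sums_alt (a_sequence : List Int) : List Int :=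
  let st := pvPairLoop 0 0 a_sequence
  [st.2, st.1]

-- ===== PRECONDITION & SPEC =====
def Spec_even_odd_sums (a_sequence : List Int) (out : List Int) : Prop := out = even_odd_sums_alt a_sequence
instance (a_sequence : List Int) (out : List Int) : Decidable (Spec_even_odd_sums a_sequence out) := by unfold Spec_even_odd_sums; infer_instance

-- ===== CLAIM (what is proved, stated in full; the proofs are below) =====
def Claim_equal_even_odd_sums : Prop := ∀ (a_sequence : List Int), Dom_even_odd_sums a_sequence → Spec_even_odd_sums a_sequence (even_odd_sums a_sequence)

-- ===== LEMMAS AND PROOFS =====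

theorem pvLoop_eq (o e : Int) (xs : List Int) : ∀ (s : Int), s % 2 = 1 →
    (PySem.List.enumerate xs s).foldl
      (fun (acc : Int × Int) p =>
        if p.1 % 2 == 0 then (acc.1 + p.2, acc.2) else (acc.1, acc.2 + p.2))
      (e, o)
    = ((pvPairLoop o e xs).2, (pvPairLoop o e xs).1) := by
  induction o, e, xs using pvPairLoop.induct with
  | case1 o e =>
      intro s _
      simp [PySem.List.enumerate_nil, pvPairLoop]
  | case2 o e x =>
      intro s hs
      have h1 : (s % 2 == 0) = false := by simp; omega
      simp only [PySem.List.enumerate_cons, PySem.List.enumerate_nil, List.foldl_cons,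
        List.foldl_nil, h1, Bool.false_eq_true, if_false, pvPairLoop]
      simp
  | case3 o e x y rest ih =>
      intro s hs
      have h1 : (s % 2 == 0) = false := by simp; omega
      have h2 : ((s + 1) % 2 == 0) = true := by simp; omega
      simp only [PySem.List.enumerate_cons, List.foldl_cons, h1, h2, Bool.false_eq_true,
        if_false, if_true, pvPairLoop]
      exact ih (s + 1 + 1) (by omega)

-- ===== VERDICT (by name: the statement is the Claim_ definition above) =====
theorem even_odd_sums_spec : Claim_equal_even_odd_sums := by
  intro xs _
  show _ = _
  simp only [even_odd_sums, even_odd_sums_alt]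
  rw [pvLoop_eq 0 0 xs 1 (by decide)]
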